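-- pv_equiv track=rewrite | github.com/diocloid/adventOfCode | 2021/day14/day14part1.py | answerfrompairs
-- ===== SOURCE A (Python) =====
-- from collections import Counter
--
-- def answerfrompairs(pairs):
--     last = pairs[len(pairs)-1][1]
--     for i in range(len(pairs)-1, -1, -1):
--         pairs[i] = pairs[i][0]
--     pairs.append(last)
--
--     maxoccurence = max(set(pairs), key = pairs.count)
--     minoccurence = min(set(pairs), key = pairs.count)
--     counter = Counter(pairs)
--     return counter[maxoccurence] - counter[minoccurence]
-- ===== SOURCE B (Python) =====
-- def answerfrompairs(pairs):
--     last = pairs[len(pairs)-1][1]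
--     pairs[:] = [p[0] for p in pairs]
--     pairs.append(last)
--     xs = sorted(pairs)
--     runlens = []
--     i = 0
--     while i < len(xs):
--         j = i + 1
--         while j < len(xs) and xs[j] == xs[i]:
--             j += 1
--         runlens.append(j - i)
--         i = j
--     return max(runlens) - min(runlens)
-- ===== Notes on version B (the rewrite author's own statement) =====
-- stated objective: alternative
-- what changed: B drops A's hash-based counting and repeated argmax/argmin count scans (max/min over set(pairs) with key=pairs.count) and instead sorts the element list once and run-length-scans it, returning max run length minus min run length.
import Mathlib
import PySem

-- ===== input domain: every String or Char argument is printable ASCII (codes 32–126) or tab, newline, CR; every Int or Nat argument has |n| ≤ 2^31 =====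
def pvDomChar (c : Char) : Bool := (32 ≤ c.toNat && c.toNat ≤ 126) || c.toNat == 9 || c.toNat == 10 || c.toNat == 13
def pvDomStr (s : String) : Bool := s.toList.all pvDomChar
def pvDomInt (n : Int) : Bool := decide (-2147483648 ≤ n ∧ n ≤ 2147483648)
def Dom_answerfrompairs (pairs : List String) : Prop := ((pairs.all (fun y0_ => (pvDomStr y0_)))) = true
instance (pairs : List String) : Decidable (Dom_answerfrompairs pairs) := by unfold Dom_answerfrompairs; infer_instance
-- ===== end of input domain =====

-- B replaces A's hash-based counting and repeated argmax/argmin count scans by a sort-then-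
-- run-length pass: it sorts the element list once and measures each maximal run of equal
-- elements, returning max run length minus min run length. Both A and B mutate `pairs` in
-- place identically; the theorems below are about the return value.

-- ===== PORT A =====
def answerfrompairs (pairs : List String) : Int :=
  -- last = pairs[len(pairs)-1][1]
  match PySem.List.pyGet? pairs ((pairs.length : Int) - 1) with
  | none => 0     -- IndexError, excluded by Pre_
  | some lastS =>
    match PySem.Str.pyGet? lastS 1 with
    | none => 0   -- IndexError, excluded by Pre_
    | some lastC =>
      -- for i in range(len(pairs)-1, -1, -1): pairs[i] = pairs[i][0]
      let ps := (PySem.List.pyRange ((pairs.length : Int) - 1) (-1) (-1)).foldl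
        (fun acc i =>
          match PySem.List.pyGet? acc i with
          | none => acc       -- unreachable: i is always in range
          | some s =>
            match PySem.Str.pyGet? s 0 with
            | none => acc     -- IndexError (empty string), excluded by Pre_
            | some c => PySem.List.pySetD acc i (String.singleton c)) pairs
      -- pairs.append(last)
      let ps2 := ps ++ [String.singleton lastC]
      let key := fun x => (PySem.List.count ps2 x : Int)
      -- maxoccurence / minoccurence over set(pairs) with key = pairs.count
      match PySem.List.max? (PySem.Set.ofList ps2) key,
            PySem.List.min? (PySem.Set.ofList ps2) key with
      | some mx, some mn =>
        (PySem.Dict.counter ps2).getD mx 0 - (PySem.Dict.counter ps2).getD mn 0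
      | _, _ => 0   -- unreachable: ps2 is nonempty

-- ===== PORT B =====
-- the while loop over the sorted list: the inner `while` scans the current run (takeWhile),
-- the run length is j - i = 1 + length of the equal tail, and the outer loop resumes at j
-- (dropWhile); hand-ported step for step, exact for every list.
def pvRunLens : List String → List Int
  | [] => []
  | x :: t =>
    ((t.takeWhile (fun y => y == x)).length + 1 : Int)
      :: pvRunLens (t.dropWhile (fun y => y == x))
termination_by l => l.length
decreasing_by
  simp only [List.length_cons]
  exact Nat.lt_succ_of_le (List.length_dropWhile_le _ _)

def answerfrompairs_alt (pairs : List String) : Int :=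
  -- last = pairs[len(pairs)-1][1]  (Option plumbing: none = IndexError, excluded by Pre_)
  ((PySem.List.pyGet? pairs ((pairs.length : Int) - 1)).bind (fun lastS =>
    (PySem.Str.pyGet? lastS 1).map (fun lastC =>
      -- pairs[:] = [p[0] for p in pairs]; pairs.append(last)
      let L := pairs.map (fun p => ((PySem.Str.pyGet? p 0).map String.singleton).getD p)
        ++ [String.singleton lastC]
      -- xs = sorted(pairs); run-length scan; return max(runlens) - min(runlens)
      let lens := pvRunLens (PySem.List.sorted L (fun x => x) false)
      ((PySem.List.max? lens (fun x => x)).bind (fun M =>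
        (PySem.List.min? lens (fun x => x)).map (fun m => M - m))).getD 0))).getD 0

-- ===== PRECONDITION & SPEC =====
-- Pre_ excludes exactly the inputs on which A raises IndexError: the empty list,
-- a last element shorter than 2 characters, or any empty-string element.
def Pre_answerfrompairs (pairs : List String) : Prop :=
  pairs ≠ [] ∧ 2 ≤ (pairs.getLastD "").toList.length ∧ ∀ s ∈ pairs, s.toList ≠ []
instance (pairs : List String) : Decidable (Pre_answerfrompairs pairs) := by
  unfold Pre_answerfrompairs; infer_instance

def pvWitness_answerfrompairs : List String := ["ab", "bc"]

def Spec_answerfrompairs (pairs : List String) (out : Int) : Prop := out = answerfrompairs_alt pairs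
instance (pairs : List String) (out : Int) : Decidable (Spec_answerfrompairs pairs out) := by unfold Spec_answerfrompairs; infer_instance

-- ===== CLAIM (what is proved, stated in full; the proofs are below) =====
def Claim_equal_answerfrompairs : Prop := ∀ (pairs : List String), Dom_answerfrompairs pairs → Pre_answerfrompairs pairs → Spec_answerfrompairs pairs (answerfrompairs pairs)

-- ===== LEMMAS AND PROOFS =====

-- B's per-element transformation (p[0] as a 1-character string).
def pvFirst (p : String) : String :=
  match PySem.Str.pyGet? p 0 with
  | some c => String.singleton c
  | none => p

-- A's countdown loop rewrites the first k positions elementwise.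
lemma pvLoop_eq (ps : List String) (k : Nat) (hk : k ≤ ps.length)
    (hne : ∀ s ∈ ps, s.toList ≠ []) :
    (PySem.List.pyRange ((k : Int) - 1) (-1) (-1)).foldl
      (fun acc i =>
        match PySem.List.pyGet? acc i with
        | none => acc
        | some s =>
          match PySem.Str.pyGet? s 0 with
          | none => acc
          | some c => PySem.List.pySetD acc i (String.singleton c)) ps
    = (ps.take k).map pvFirst ++ ps.drop k := by
  induction k generalizing ps with
  | zero =>
      rw [PySem.List.pyRange_neg_one_eq_nil (by norm_num)]
      simp
  | succ k ih =>
      have hlt : (-1 : Int) < (k + 1 : Nat) - 1 := by push_cast; omega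
      rw [PySem.List.pyRange_neg_one_cons hlt]
      have hkk : ((k + 1 : Nat) : Int) - 1 = (k : Int) := by push_cast; ring
      have hklen : k < ps.length := by omega
      have hget : PySem.List.pyGet? ps (k : Int) = some ps[k] := by
        rw [PySem.List.pyGet?_eq_some_getElem ps (by positivity) (by exact_mod_cast hklen)]
        simp
      have hne' : ps[k].toList ≠ [] := hne _ (List.getElem_mem hklen)
      obtain ⟨c, t, hct⟩ : ∃ c t, ps[k].toList = c :: t := by
        cases h : ps[k].toList with
        | nil => exact absurd h hne'
        | cons c t => exact ⟨c, t, rfl⟩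
      have hgetc : PySem.Str.pyGet? ps[k] 0 = some c := by
        rw [show (0 : Int) = ((0 : Nat) : Int) by norm_num, PySem.Str.pyGet?_natCast, hct]; rfl
      have hset : PySem.List.pySetD ps (k : Int) (String.singleton c) = ps.set k (String.singleton c) :=
        PySem.List.pySetD_natCast ..
      rw [List.foldl_cons, hkk]
      simp only [hget, hgetc, hset]
      have hfk : pvFirst ps[k] = String.singleton c := by
        unfold pvFirst; rw [hgetc]
      have hne2 : ∀ s ∈ ps.set k (String.singleton c), s.toList ≠ [] := by
        intro s hs
        rcases List.mem_or_eq_of_mem_set hs with h | rfl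
        · exact hne _ h
        · simp [String.singleton]
      rw [ih _ (by simp; omega) hne2]
      have htake : (ps.set k (String.singleton c)).take k = ps.take k := by
        apply List.ext_getElem
        · simp
        · intro i h1 h2
          simp at h1
          simp [List.getElem_take, List.getElem_set]
          intro hki
          exact absurd hki (Nat.ne_of_gt h1.1)
      have hdrop : (ps.set k (String.singleton c)).drop k
          = String.singleton c :: ps.drop (k + 1) := by
        apply List.ext_getElem
        · simp; omega
        · intro i h1 h2
          rcases Nat.eq_zero_or_pos i with rfl | hi
          · simp [List.getElem_drop]
          · simp only [List.getElem_drop, List.getElem_set]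
            have : k + i ≠ k := by omega
            simp only [List.getElem_cons]
            have hi' : i ≠ 0 := by omega
            simp [hi']
            congr 1
            omega
      rw [htake, hdrop]
      have htk : List.map pvFirst (List.take (k + 1) ps)
          = List.map pvFirst (List.take k ps) ++ [pvFirst ps[k]] := by
        simp only [List.map_take]
        rw [List.take_add_one]
        simp [hklen]
      rw [htk, hfk]
      simp

-- identity-key max?/min? depend only on the multiset of values
lemma pv_max_id_perm (l₁ l₂ : List Int) (h : l₁.Perm l₂) :
    PySem.List.max? l₁ (fun x => x) = PySem.List.max? l₂ (fun x => x) := by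
  cases h1 : PySem.List.max? l₁ (fun x => x) with
  | none =>
      have : l₁ = [] := (PySem.List.max?_eq_none_iff _ _).1 h1
      subst this
      rw [show l₂ = [] from h.nil_eq.symm]
      rfl
  | some a =>
      cases h2 : PySem.List.max? l₂ (fun x => x) with
      | none =>
          have : l₂ = [] := (PySem.List.max?_eq_none_iff _ _).1 h2
          subst this
          exact absurd (h.mem_iff.1 (PySem.List.max?_mem h1)) (List.not_mem_nil)
      | some b =>
          have hab : a ≤ b := PySem.List.max?_isMax h2 _ (h.mem_iff.1 (PySem.List.max?_mem h1))
          have hba : b ≤ a := PySem.List.max?_isMax h1 _ (h.mem_iff.2 (PySem.List.max?_mem h2))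
          exact congrArg some (le_antisymm hab hba)

lemma pv_min_id_perm (l₁ l₂ : List Int) (h : l₁.Perm l₂) :
    PySem.List.min? l₁ (fun x => x) = PySem.List.min? l₂ (fun x => x) := by
  cases h1 : PySem.List.min? l₁ (fun x => x) with
  | none =>
      have : l₁ = [] := (PySem.List.min?_eq_none_iff _ _).1 h1
      subst this
      rw [show l₂ = [] from h.nil_eq.symm]
      rfl
  | some a =>
      cases h2 : PySem.List.min? l₂ (fun x => x) with
      | none =>
          have : l₂ = [] := (PySem.List.min?_eq_none_iff _ _).1 h2
          subst this
          exact absurd (h.mem_iff.1 (PySem.List.min?_mem h1)) (List.not_mem_nil)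
      | some b =>
          have hab : b ≤ a := PySem.List.min?_isMin h2 _ (h.mem_iff.1 (PySem.List.min?_mem h1))
          have hba : a ≤ b := PySem.List.min?_isMin h1 _ (h.mem_iff.2 (PySem.List.min?_mem h2))
          exact congrArg some (le_antisymm hba hab)

-- absorbing a fold of Set.add over elements already present
lemma pv_foldl_add_absorb (l s : List String) (hl : ∀ y ∈ l, y ∈ s) :
    l.foldl PySem.Set.add s = s := by
  induction l generalizing s with
  | nil => rfl
  | cons a t ih =>
      rw [List.foldl_cons, PySem.Set.add_of_mem (hl a (by simp))]
      exact ih s (fun y hy => hl y (by simp [hy]))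

-- a fold of Set.add over elements different from x keeps x at the head
lemma pv_foldl_add_cons (x : String) (l s : List String) (hx : ∀ y ∈ l, y ≠ x) :
    l.foldl PySem.Set.add (x :: s) = x :: l.foldl PySem.Set.add s := by
  induction l generalizing s with
  | nil => rfl
  | cons a t ih =>
      have ha : a ≠ x := hx a (by simp)
      have hadd : PySem.Set.add (x :: s) a = x :: PySem.Set.add s a := by
        rw [PySem.Set.add_eq_ite, PySem.Set.add_eq_ite]
        by_cases h : a ∈ s
        · simp [h, ha]
        · have : a ∉ x :: s := by simp [ha, h]
          simp [h, this]
      rw [List.foldl_cons, hadd, List.foldl_cons]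
      exact ih (PySem.Set.add s a) (fun y hy => hx y (by simp [hy]))

-- on a sorted list, everything the run-scan leaves behind is strictly above the run head
lemma pv_dropWhile_gt (x : String) (t : List String) (hx : ∀ y ∈ t, x ≤ y)
    (ht : t.Pairwise (· ≤ ·)) :
    ∀ z ∈ t.dropWhile (fun y => y == x), x < z := by
  intro z hz
  have hsub : (t.dropWhile (fun y => y == x)).Sublist t := List.dropWhile_sublist _
  have htdp : (t.dropWhile (fun y => y == x)).Pairwise (· ≤ ·) := ht.sublist hsub
  cases hc : t.dropWhile (fun y => y == x) with
  | nil => rw [hc] at hz; simp at hz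
  | cons h0 rest =>
      rw [hc] at hz htdp
      have hh0f : (h0 == x) = false := by
        have h0l : 0 < (t.dropWhile (fun y => y == x)).length := by rw [hc]; simp
        have := List.dropWhile_get_zero_not t (p := fun y => y == x) h0l
        simpa [hc] using this
      have hh0ne : h0 ≠ x := by intro he; rw [he] at hh0f; simp at hh0f
      have hh0mem : h0 ∈ t := hsub.mem (hc ▸ List.mem_cons_self ..)
      have hxh0 : x < h0 := lt_of_le_of_ne (hx _ hh0mem) (Ne.symm hh0ne)
      rcases List.mem_cons.1 hz with rfl | hz'
      · exact hxh0
      · exact lt_of_lt_of_le hxh0 ((List.pairwise_cons.1 htdp).1 z hz')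

-- the run lengths of a sorted list are the multiplicities of its distinct elements
lemma pvRunLens_sorted (l : List String) (h : l.Pairwise (· ≤ ·)) :
    pvRunLens l = (PySem.Set.ofList l).map (fun y => (l.count y : Int)) := by
  induction l using pvRunLens.induct with
  | case1 => simp [pvRunLens]
  | case2 x t ih =>
      have hx : ∀ y ∈ t, x ≤ y := (List.pairwise_cons.1 h).1
      have ht : t.Pairwise (· ≤ ·) := (List.pairwise_cons.1 h).2
      have hsplit : t.takeWhile (fun y => y == x) ++ t.dropWhile (fun y => y == x) = t :=
        List.takeWhile_append_dropWhile
      have htw : ∀ y ∈ t.takeWhile (fun y => y == x), y = x := by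
        intro y hy
        exact eq_of_beq (List.mem_takeWhile_imp (p := fun y => y == x) hy)
      have htd := pv_dropWhile_gt x t hx ht
      have htdne : ∀ z ∈ t.dropWhile (fun y => y == x), z ≠ x :=
        fun z hz => ne_of_gt (htd z hz)
      have hxnottd : x ∉ t.dropWhile (fun y => y == x) :=
        fun hmem => lt_irrefl x (htd x hmem)
      -- set(x :: t) = x :: set(remainder)
      have hset : PySem.Set.ofList (x :: t)
          = x :: PySem.Set.ofList (t.dropWhile (fun y => y == x)) := by
        rw [PySem.Set.ofList_eq_foldl, List.foldl_cons]
        have h1 : PySem.Set.add [] x = [x] := by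
          rw [PySem.Set.add_eq_ite]; simp
        rw [h1]
        conv_lhs => rw [← hsplit]
        rw [List.foldl_append,
          pv_foldl_add_absorb _ [x] (fun y hy => by simp [htw y hy]),
          pv_foldl_add_cons x _ [] htdne]
        rfl
      -- multiplicities
      have hcx : List.count x (x :: t) = (t.takeWhile (fun y => y == x)).length + 1 := by
        rw [List.count_cons_self]
        conv_lhs => rw [← hsplit]
        rw [List.count_append, List.count_eq_zero.2 hxnottd,
          List.count_eq_length.2 (fun b hb => (htw b hb).symm)]
      have hcy : ∀ y ∈ t.dropWhile (fun y => y == x),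
          List.count y (x :: t) = List.count y (t.dropWhile (fun y => y == x)) := by
        intro y hy
        have hyx : y ≠ x := htdne y hy
        have h0 : List.count y (x :: t) = List.count y t := by
          simp [Ne.symm hyx]
        rw [h0]
        conv_lhs => rw [← hsplit]
        rw [List.count_append,
          List.count_eq_zero.2 (fun hmem => hyx (htw y hmem))]
        simp
      simp only [pvRunLens]
      rw [hset, List.map_cons, ih (ht.sublist (List.dropWhile_sublist _))]
      congr 1
      · show _ = (List.count x (x :: t) : Int)
        rw [hcx]; push_cast; ring
      · exact (List.map_congr_left
          (fun y hy => by rw [hcy y ((PySem.Set.mem_ofList _ _).1 hy)])).symm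

-- the key-value of the first argmax under `f` equals the plain max of the mapped values
lemma pv_keymax {α : Type} (S : List α) (f : α → Int) (mx : α) (M : Int)
    (h1 : PySem.List.max? S f = some mx)
    (h2 : PySem.List.max? (S.map f) (fun x => x) = some M) : f mx = M := by
  have hmem := PySem.List.max?_mem h1
  have hmax := PySem.List.max?_isMax h1
  have hmem2 := PySem.List.max?_mem h2
  have hmax2 := PySem.List.max?_isMax h2
  obtain ⟨y, hy, rfl⟩ := List.mem_map.1 hmem2
  exact le_antisymm (hmax2 _ (List.mem_map_of_mem hmem)) (hmax _ hy)

lemma pv_keymin {α : Type} (S : List α) (f : α → Int) (mn : α) (m : Int)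
    (h1 : PySem.List.min? S f = some mn)
    (h2 : PySem.List.min? (S.map f) (fun x => x) = some m) : f mn = m := by
  have hmem := PySem.List.min?_mem h1
  have hmin := PySem.List.min?_isMin h1
  have hmem2 := PySem.List.min?_mem h2
  have hmin2 := PySem.List.min?_isMin h2
  obtain ⟨y, hy, rfl⟩ := List.mem_map.1 hmem2
  exact le_antisymm (hmin _ hy) (hmin2 _ (List.mem_map_of_mem hmem))

-- ===== VERDICT (by name: the statement is the Claim_ definition above) =====
theorem answerfrompairs_spec : Claim_equal_answerfrompairs := by
  intro pairs _ hpre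
  obtain ⟨hnil, hlast2, hne⟩ := hpre
  unfold Spec_answerfrompairs answerfrompairs answerfrompairs_alt
  have hlen : 0 < pairs.length := List.length_pos_iff.2 hnil
  have hA : PySem.List.pyGet? pairs ((pairs.length : Int) - 1)
      = some (pairs.getLast hnil) := by
    have h0 : (0:Int) ≤ (pairs.length : Int) - 1 := by omega
    have h1 : (pairs.length : Int) - 1 < (pairs.length : Int) := by omega
    rw [PySem.List.pyGet?_eq_some_getElem pairs h0 h1]
    have hidx : ((pairs.length : Int) - 1).toNat = pairs.length - 1 := by omega
    rw [List.getLast_eq_getElem]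
    exact congrArg some (getElem_congr rfl hidx (hidx ▸ (by omega)))
  have hg : pairs.getLastD "" = pairs.getLast hnil := by
    rw [List.getLastD_eq_getLast?, List.getLast?_eq_some_getLast hnil]
    rfl
  rw [hg] at hlast2
  obtain ⟨c0, c1, t, hct⟩ : ∃ c0 c1 t, (pairs.getLast hnil).toList = c0 :: c1 :: t := by
    cases h : (pairs.getLast hnil).toList with
    | nil => exfalso; rw [h] at hlast2; simp at hlast2
    | cons a t1 =>
      cases t1 with
      | nil => exfalso; rw [h] at hlast2; simp at hlast2
      | cons b t => exact ⟨a, b, t, rfl⟩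
  have hget1 : PySem.Str.pyGet? (pairs.getLast hnil) 1 = some c1 := by
    rw [show (1 : Int) = ((1 : Nat) : Int) by norm_num, PySem.Str.pyGet?_natCast, hct]; rfl
  simp only [hA, hget1, Option.bind_some, Option.map_some, Option.getD_some]
  -- the loop result equals B's map
  rw [pvLoop_eq pairs pairs.length le_rfl hne, List.take_length, List.drop_length,
      List.append_nil]
  have hmapeq : pairs.map (fun p =>
      ((PySem.Str.pyGet? p 0).map String.singleton).getD p) = pairs.map pvFirst := by
    apply List.map_congr_left; intro s _
    unfold pvFirst
    cases PySem.Str.pyGet? s 0 <;> simp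
  rw [hmapeq]
  set L := pairs.map pvFirst ++ [String.singleton c1] with hL
  have hLne : L ≠ [] := by simp [hL]
  have hSne : PySem.Set.ofList L ≠ [] := by
    intro h
    have : L.head hLne ∈ PySem.Set.ofList L := by
      rw [PySem.Set.mem_ofList]; exact List.head_mem hLne
    simp [h] at this
  set f := fun x => (PySem.List.count L x : Int) with hf
  -- B's run-length list is a rearrangement of the multiplicity list
  have hperm : pvRunLens (PySem.List.sorted L (fun x => x) false)
      |>.Perm ((PySem.Set.ofList L).map f) := by
    have hsort : (PySem.List.sorted L (fun x => x) false).Pairwise (· ≤ ·) := by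
      have := PySem.List.sorted_pairwise (xs := L) (key := fun x => x) (κ := String)
      simpa using this
    rw [pvRunLens_sorted _ hsort]
    have hp : (PySem.List.sorted L (fun x => x) false).Perm L := PySem.List.sorted_perm ..
    have hcnt : ∀ y, List.count y (PySem.List.sorted L (fun x => x) false) = List.count y L :=
      fun y => hp.count_eq y
    have hmc : (PySem.Set.ofList (PySem.List.sorted L (fun x => x) false)).map
        (fun y => (List.count y (PySem.List.sorted L (fun x => x) false) : Int))
        = (PySem.Set.ofList (PySem.List.sorted L (fun x => x) false)).map f := by
      apply List.map_congr_left
      intro y _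
      rw [hcnt y, hf]
      simp [PySem.List.count_eq]
    rw [hmc]
    apply List.Perm.map
    apply (List.perm_ext_iff_of_nodup (PySem.Set.nodup_ofList _) (PySem.Set.nodup_ofList _)).2
    intro y
    rw [PySem.Set.mem_ofList, PySem.Set.mem_ofList, PySem.List.mem_sorted]
  -- extrema exist on both sides
  obtain ⟨mx, hmx⟩ : ∃ mx, PySem.List.max? (PySem.Set.ofList L) f = some mx := by
    cases h : PySem.List.max? (PySem.Set.ofList L) f with
    | none => exact absurd ((PySem.List.max?_eq_none_iff _ _).1 h) hSne
    | some mx => exact ⟨mx, rfl⟩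
  obtain ⟨mn, hmn⟩ : ∃ mn, PySem.List.min? (PySem.Set.ofList L) f = some mn := by
    cases h : PySem.List.min? (PySem.Set.ofList L) f with
    | none => exact absurd ((PySem.List.min?_eq_none_iff _ _).1 h) hSne
    | some mn => exact ⟨mn, rfl⟩
  obtain ⟨M, hM⟩ : ∃ M, PySem.List.max? ((PySem.Set.ofList L).map f) (fun x => x) = some M := by
    cases h : PySem.List.max? ((PySem.Set.ofList L).map f) (fun x => x) with
    | none => exact absurd (by simpa using (PySem.List.max?_eq_none_iff _ _).1 h) hSne
    | some M => exact ⟨M, rfl⟩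
  obtain ⟨m, hm⟩ : ∃ m, PySem.List.min? ((PySem.Set.ofList L).map f) (fun x => x) = some m := by
    cases h : PySem.List.min? ((PySem.Set.ofList L).map f) (fun x => x) with
    | none => exact absurd (by simpa using (PySem.List.min?_eq_none_iff _ _).1 h) hSne
    | some m => exact ⟨m, rfl⟩
  rw [hmx, hmn, pv_max_id_perm _ _ hperm, pv_min_id_perm _ _ hperm, hM, hm]
  simp only [Option.bind_some, Option.map_some, Option.getD_some]
  have h1 := pv_keymax _ _ _ _ hmx hM
  have h2 := pv_keymin _ _ _ _ hmn hm
  show (PySem.Dict.counter L).getD mx 0 - (PySem.Dict.counter L).getD mn 0 = M - m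
  rw [PySem.Dict.getD_counter, PySem.Dict.getD_counter]
  have hc1 : ((List.count mx L : Nat) : Int) = M := by
    simpa [hf, PySem.List.count_eq] using h1
  have hc2 : ((List.count mn L : Nat) : Int) = m := by
    simpa [hf, PySem.List.count_eq] using h2
  omega
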